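-- pv_equiv track=rewrite | github.com/rebuilder945/FL_research | ast_research/python_code_5.23/lastterm_page7/success_code/李响-3225-2023-04-24_15_09_52.py | work
-- ===== SOURCE A (Python) =====
-- def work(a) :
--    b = []
--    s = 1
--    t = 1
--    for x in range(a):
--       s= (x+1)*s
--       b.append(x)
--       b.append(s)
--    return b
-- ===== SOURCE B (Python) =====
-- def work(a):
--     facts = []
--     for k in range(1, a + 1):
--         facts.append((facts[-1] if facts else 1) * k)
--     return [v for pair in zip(range(a), facts) for v in pair]
-- ===== Notes on version B (the rewrite author's own statement) =====
-- stated objective: alternative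
-- what changed: Replaces the single stateful loop (running product plus two appends per iteration) with two separate passes: first build the factorial prefix-product list, then interleave it with the indices via zip in a flat comprehension.
import Mathlib
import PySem

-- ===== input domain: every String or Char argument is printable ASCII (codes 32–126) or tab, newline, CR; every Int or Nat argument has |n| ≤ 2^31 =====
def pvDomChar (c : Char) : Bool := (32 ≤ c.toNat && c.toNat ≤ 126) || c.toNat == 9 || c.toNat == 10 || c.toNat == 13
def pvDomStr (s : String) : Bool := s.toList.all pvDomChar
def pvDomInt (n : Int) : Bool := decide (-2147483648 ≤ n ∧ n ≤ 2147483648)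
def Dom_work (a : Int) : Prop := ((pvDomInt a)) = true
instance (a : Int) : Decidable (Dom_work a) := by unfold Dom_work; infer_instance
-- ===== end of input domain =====

-- B replaces the single stateful loop (running product + two appends per iteration) with
-- two separate passes: build the factorial prefix-product list, then interleave with zip.

-- ===== PORT A =====
-- loop state: (b, s); each iteration sets s := (x+1)*s then appends x and s
def work (a : Int) : List Int :=
  let st := (PySem.List.pyRange 0 a 1).foldl
    (fun (bs : List Int × Int) x => (bs.1 ++ [x] ++ [(x + 1) * bs.2], (x + 1) * bs.2))
    ([], 1)
  st.1

-- ===== PORT B =====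
-- pass 1: facts.append((facts[-1] if facts else 1) * k); pass 2: interleave via zip
def work_alt (a : Int) : List Int :=
  let facts := (PySem.List.pyRange 1 (a + 1) 1).foldl
    (fun (fs : List Int) k => fs ++ [(fs.getLast?.getD 1) * k]) []
  ((PySem.List.pyRange 0 a 1).zip facts).flatMap (fun p => [p.1, p.2])

-- ===== PRECONDITION & SPEC =====
def Spec_work (a : Int) (out : List Int) : Prop := out = work_alt a
instance (a : Int) (out : List Int) : Decidable (Spec_work a out) := by unfold Spec_work; infer_instance

-- ===== CLAIM (what is proved, stated in full; the proofs are below) =====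
def Claim_equal_work : Prop := ∀ (a : Int), Dom_work a → Spec_work a (work a)

-- ===== LEMMAS AND PROOFS =====

def pvF (n : Nat) : Int := (Nat.factorial n : Int)

def pvFlat (n : Nat) : List Int := (List.range n).flatMap (fun (k : Nat) => [(k : Int), pvF (k + 1)])

theorem pvF_succ (n : Nat) : pvF (n + 1) = pvF n * ((n : Int) + 1) := by
  unfold pvF
  rw [Nat.factorial_succ]
  push_cast
  ring

theorem work_A_inv (n : Nat) :
    (PySem.List.pyRange 0 (n : Int) 1).foldl
      (fun (bs : List Int × Int) x => (bs.1 ++ [x] ++ [(x + 1) * bs.2], (x + 1) * bs.2))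
      ([], 1)
    = (pvFlat n, pvF n) := by
  induction n with
  | zero => simp [PySem.List.pyRange_one_eq_nil (le_refl 0), pvFlat, pvF, Nat.factorial]
  | succ n ih =>
      rw [show ((n + 1 : Nat) : Int) = (n : Int) + 1 by push_cast; ring,
          PySem.List.pyRange_one_succ_right (by omega), List.foldl_append, ih]
      simp [pvFlat, List.range_succ]
      rw [pvF_succ]
      ring

theorem work_B_facts (n : Nat) :
    (PySem.List.pyRange 1 ((n : Int) + 1) 1).foldl
      (fun (fs : List Int) k => fs ++ [(fs.getLast?.getD 1) * k]) []
    = (List.range n).map (fun k => pvF (k + 1)) := by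
  induction n with
  | zero =>
      rw [show ((0 : Nat) : Int) + 1 = 1 by norm_num,
          PySem.List.pyRange_one_eq_nil (le_refl 1)]
      simp
  | succ n ih =>
      rw [show ((n + 1 : Nat) : Int) + 1 = ((n : Int) + 1) + 1 by push_cast; ring,
          PySem.List.pyRange_one_succ_right (by omega), List.foldl_append, ih]
      cases n with
      | zero => simp [pvF, Nat.factorial]
      | succ m =>
          have hlast : (((List.range (m + 1)).map (fun k => pvF (k + 1))).getLast?).getD 1
              = pvF (m + 1) := by
            rw [List.range_succ, List.map_append]
            simp
          rw [show List.range (m + 1 + 1) = List.range (m + 1) ++ [m + 1] from List.range_succ,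
              List.map_append]
          simp only [List.foldl_cons, List.foldl_nil, hlast, List.map_cons, List.map_nil]
          rw [pvF_succ (m + 1)]

theorem work_zipflat (n : Nat) :
    ((PySem.List.pyRange 0 (n : Int) 1).zip ((List.range n).map (fun k => pvF (k + 1)))).flatMap
      (fun p => [p.1, p.2]) = pvFlat n := by
  induction n with
  | zero => simp [PySem.List.pyRange_one_eq_nil (le_refl 0), pvFlat]
  | succ n ih =>
      rw [show ((n + 1 : Nat) : Int) = (n : Int) + 1 by push_cast; ring,
          PySem.List.pyRange_one_succ_right (by omega), List.range_succ, List.map_append,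
          List.zip_append (by simp [PySem.List.length_pyRange_one]),
          List.flatMap_append, ih]
      simp [pvFlat, List.range_succ]

theorem work_eq (a : Int) : work a = work_alt a := by
  unfold work work_alt
  by_cases h : a ≤ 0
  · simp [PySem.List.pyRange_one_eq_nil h, PySem.List.pyRange_one_eq_nil (by omega : a + 1 ≤ 1)]
  · have ha : ((a.toNat : Nat) : Int) = a := Int.toNat_of_nonneg (by omega)
    rw [← ha, work_A_inv, work_B_facts, work_zipflat]

-- ===== VERDICT (by name: the statement is the Claim_ definition above) =====
theorem work_spec : Claim_equal_work := by
  intro a _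
  unfold Spec_work
  exact work_eq a
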